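-- pv_equiv track=rewrite | github.com/JawadKotaichh/Codeforces | Divisions/Div 3/Div 3 1043/D.py | build_sol1
-- ===== SOURCE A (Python) =====
-- def build_sol1(max_len: int):
--     sol1 = [0] * (max_len + 1)
--     sol1[0] = 0
--     if max_len >= 1:
--         sol1[1] = 1
--     running_sum = sol1[1] if max_len >= 1 else 0  # sum_{j=1..i-1} sol1[j]
--     pow10 = 10  # 10^(i-1), starting at i=2
--     for i in range(2, max_len + 1):
--         sol1[i] = running_sum * 9 + pow10
--         running_sum += sol1[i]
--         pow10 *= 10
--     return sol1
-- ===== SOURCE B (Python) =====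
-- def build_sol1(max_len: int):
--     def term(i):
--         if i == 0:
--             return 0
--         if i == 1:
--             return 1
--         return 10 ** (i - 2) * (9 * (i - 1) + 10)
--     return [term(i) for i in range(max_len + 1)]
-- ===== Notes on version B (the rewrite author's own statement) =====
-- stated objective: simpler
-- what changed: Replaces the sequential running-sum/pow10 recurrence with an independent per-index closed form sol1[i] = 10^(i-2)*(9*(i-1)+10), built as a single comprehension with no carried state.
import Mathlib
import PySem

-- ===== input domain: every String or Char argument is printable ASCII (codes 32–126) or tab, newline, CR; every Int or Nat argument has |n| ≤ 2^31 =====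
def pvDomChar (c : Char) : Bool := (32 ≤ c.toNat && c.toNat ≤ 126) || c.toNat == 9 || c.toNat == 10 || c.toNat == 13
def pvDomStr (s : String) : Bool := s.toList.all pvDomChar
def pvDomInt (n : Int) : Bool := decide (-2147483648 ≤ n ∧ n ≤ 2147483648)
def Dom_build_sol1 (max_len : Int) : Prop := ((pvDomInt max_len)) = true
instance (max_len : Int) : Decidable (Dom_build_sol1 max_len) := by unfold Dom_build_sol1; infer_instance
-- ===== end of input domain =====

-- B replaces A's running-sum/pow10 recurrence by an independent closed form per index (objective: simpler).

-- ===== PORT A =====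
def build_sol1 (max_len : Int) : List Int :=
  let sol1 := List.replicate (max_len + 1).toNat (0 : Int)
  let sol1 := sol1.set 0 0
  let sol1 := if max_len ≥ 1 then sol1.set 1 1 else sol1
  let running_sum : Int := if max_len ≥ 1 then (PySem.List.pyGet? sol1 1).getD 0 else 0
  let st := (PySem.List.pyRange 2 (max_len + 1) 1).foldl
    (fun (st : List Int × Int × Int) i =>
      let v := st.2.1 * 9 + st.2.2
      (st.1.set i.toNat v, st.2.1 + v, st.2.2 * 10)) (sol1, running_sum, 10)
  st.1

-- ===== PORT B =====
def pvTerm (i : Int) : Int :=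
  if i == 0 then 0
  else if i == 1 then 1
  else 10 ^ (i - 2).toNat * (9 * (i - 1) + 10)

def build_sol1_alt (max_len : Int) : List Int :=
  (PySem.List.pyRange 0 (max_len + 1) 1).map pvTerm

-- ===== PRECONDITION & SPEC =====
-- Pre_ excludes max_len < 0, on which A raises IndexError (assigning sol1[0] on the empty list).
def Pre_build_sol1 (max_len : Int) : Prop := 0 ≤ max_len
instance (max_len : Int) : Decidable (Pre_build_sol1 max_len) := by unfold Pre_build_sol1; infer_instance
def pvWitness_build_sol1 : Int := (3)

def Spec_build_sol1 (max_len : Int) (out : List Int) : Prop := out = build_sol1_alt max_len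
instance (max_len : Int) (out : List Int) : Decidable (Spec_build_sol1 max_len out) := by unfold Spec_build_sol1; infer_instance

-- ===== CLAIM (what is proved, stated in full; the proofs are below) =====
def Claim_equal_build_sol1 : Prop := ∀ (max_len : Int), Dom_build_sol1 max_len → Pre_build_sol1 max_len → Spec_build_sol1 max_len (build_sol1 max_len)

-- ===== LEMMAS AND PROOFS =====

-- The closed-form value B assigns at index i ≥ 2.
def pvG (i : Int) : Int := 10 ^ (i - 2).toNat * (9 * (i - 1) + 10)

-- A's loop body.
def pvStepA (st : List Int × Int × Int) (i : Int) : List Int × Int × Int :=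
  let v := st.2.1 * 9 + st.2.2
  (st.1.set i.toNat v, st.2.1 + v, st.2.2 * 10)

lemma pvG_eval (k : Nat) : pvG ((k : Int) + 2) = 10 ^ k * (9 * ((k : Int) + 1) + 10) := by
  unfold pvG
  have h1 : ((k : Int) + 2 - 2).toNat = k := by omega
  have h2 : ((k : Int) + 2 - 1) = (k : Int) + 1 := by ring
  rw [h1, h2]

-- Running-sum / pow10 invariant: A's fold equals a pure "set pvG i at i" fold,
-- with running_sum = (k+1)·10^k and pow10 = 10^(k+1) after processing 2..k+1.
lemma pvFoldA_closed (k : Nat) (s : List Int) :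
    (PySem.List.pyRange 2 ((k : Int) + 2) 1).foldl pvStepA (s, 1, 10)
      = ((PySem.List.pyRange 2 ((k : Int) + 2) 1).foldl (fun t i => t.set i.toNat (pvG i)) s,
         ((k : Int) + 1) * 10 ^ k, 10 ^ (k + 1)) := by
  induction k generalizing s with
  | zero =>
    rw [PySem.List.pyRange_one_eq_nil (by norm_num)]
    simp
  | succ k ih =>
    have hcast : ((k + 1 : Nat) : Int) + 2 = ((k : Int) + 2) + 1 := by push_cast; ring
    rw [hcast, PySem.List.pyRange_one_succ_right (by omega), List.foldl_append, List.foldl_append, ih]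
    simp only [List.foldl_cons, List.foldl_nil]
    have hv : ((k : Int) + 1) * 10 ^ k * 9 + 10 ^ (k + 1) = pvG ((k : Int) + 2) := by
      rw [pvG_eval]; ring
    unfold pvStepA
    simp only [hv, Prod.mk.injEq, true_and]
    refine ⟨?_, ?_⟩
    · rw [pvG_eval]; push_cast; ring
    · ring

-- Setting at indices strictly inside the left list commutes with an appended tail.
lemma pvSet_foldl_append (L : List Int) (s t : List Int)
    (h : ∀ i ∈ L, 0 ≤ i ∧ i.toNat < s.length) :
    (L.foldl (fun u i => u.set i.toNat (pvG i)) (s ++ t))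
      = (L.foldl (fun u i => u.set i.toNat (pvG i)) s) ++ t := by
  induction L generalizing s with
  | nil => simp
  | cons a L ih =>
    have ha := h a (by simp)
    simp only [List.foldl_cons]
    rw [List.set_append_left _ _ ha.2, ih]
    intro i hi
    have := h i (by simp [hi])
    simpa using this
lemma pvSets_eq_map (k : Nat) :
    (PySem.List.pyRange 2 ((k : Int) + 2) 1).foldl (fun t i => t.set i.toNat (pvG i))
      (((List.replicate (k + 2) (0 : Int)).set 0 0).set 1 1)
      = (PySem.List.pyRange 0 ((k : Int) + 2) 1).map pvTerm := by
  induction k with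
  | zero => decide
  | succ k ih =>
    have hcast : ((k + 1 : Nat) : Int) + 2 = ((k : Int) + 2) + 1 := by push_cast; ring
    have hlen : (((List.replicate (k + 2) (0 : Int)).set 0 0).set 1 1).length = k + 2 := by simp
    have hinit : (((List.replicate (k + 3) (0 : Int)).set 0 0).set 1 1)
        = (((List.replicate (k + 2) (0 : Int)).set 0 0).set 1 1) ++ [0] := by
      have : List.replicate (k + 3) (0 : Int) = List.replicate (k + 2) (0 : Int) ++ [0] := by
        rw [← List.replicate_succ']
      rw [this, List.set_append_left _ _ (by simp), List.set_append_left _ _ (by simp)]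
    rw [hcast, PySem.List.pyRange_one_succ_right (a := 0) (by omega),
        PySem.List.pyRange_one_succ_right (a := 2) (by omega),
        List.foldl_append, List.map_append]
    have h3 : (k + 1) + 2 = k + 3 := rfl
    rw [h3, hinit]
    rw [pvSet_foldl_append _ _ _ (by
      intro i hi
      rw [PySem.List.mem_pyRange_one] at hi
      constructor
      · omega
      · rw [hlen]; omega)]
    rw [ih]
    simp only [List.foldl_cons, List.foldl_nil, List.map_cons, List.map_nil]
    have hidx : ((k : Int) + 2).toNat = k + 2 := by omega
    have hlen2 : ((PySem.List.pyRange 0 ((k : Int) + 2) 1).map pvTerm).length = k + 2 := by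
      rw [List.length_map, PySem.List.length_pyRange_one]; omega
    rw [List.set_append]
    simp only [hlen2, hidx, lt_irrefl, Nat.sub_self]
    have hterm : pvTerm ((k : Int) + 2) = pvG ((k : Int) + 2) := by
      unfold pvTerm pvG
      rw [if_neg (by simp; omega), if_neg (by simp; omega)]
    simp [hterm]

lemma pvRs_init (k : Nat) :
    (PySem.List.pyGet? (((List.replicate (k + 2) (0 : Int)).set 0 0).set 1 1) 1).getD 0 = 1 := by
  simp only [PySem.List.pyGet?, PySem.List.pyIdx?]
  rw [if_pos (by omega), if_pos (by simp; omega)]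
  simp only [Option.bind_some, Int.toNat_one]
  rw [List.getElem?_set_self (by simp)]
  rfl

-- ===== VERDICT (by name: the statement is the Claim_ definition above) =====
theorem build_sol1_spec : Claim_equal_build_sol1 := by
  intro max_len _ hpre
  unfold Spec_build_sol1
  obtain ⟨n, rfl⟩ := Int.eq_ofNat_of_zero_le hpre
  cases n with
  | zero => decide
  | succ k =>
    unfold build_sol1 build_sol1_alt
    have h1 : ((k + 1 : Nat) : Int) ≥ 1 := by omega
    have hlen : (((k + 1 : Nat) : Int) + 1).toNat = k + 2 := by omega
    have hub : ((k + 1 : Nat) : Int) + 1 = (k : Int) + 2 := by push_cast; ring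
    have hlen' : ((k : Int) + 2).toNat = k + 2 := by omega
    simp only [if_pos h1, hub, hlen']
    rw [pvRs_init k]
    have := pvFoldA_closed k (((List.replicate (k + 2) (0 : Int)).set 0 0).set 1 1)
    have heq : (fun (st : List Int × Int × Int) i =>
        (st.1.set i.toNat (st.2.1 * 9 + st.2.2), st.2.1 + (st.2.1 * 9 + st.2.2), st.2.2 * 10)) = pvStepA := by
      funext st i; rfl
    rw [heq] at *
    rw [this, pvSets_eq_map k]
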